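-- pv_equiv track=rewrite | github.com/Sierraki/Solutions | Leetcode/算法&Algorithm/周赛/467周赛/Q2.至多K个不同元素的最大和.py | maxKDistinct
-- ===== SOURCE A (Python) =====
-- from typing import List
--
-- def maxKDistinct(nums: List[int], k: int) -> List[int]:
--     nums = list(set(nums))
--     nums.sort(reverse=True)
--     ans = k
--     for i in range(k + 1):
--         if i < len(nums) and nums[i] < 0:
--             ans = i
--             break
--     return nums[:ans]
-- ===== SOURCE B (Python) =====
-- from typing import List
--
-- def maxKDistinct(nums: List[int], k: int) -> List[int]:
--     # Filter negatives up front, dedup, then extract the maximum up to k times: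
--     # no global sort, no scan for the first negative.
--     pool = {x for x in nums if x >= 0}
--     res = []
--     while len(res) < k and pool:
--         m = max(pool)
--         pool.remove(m)
--         res.append(m)
--     return res
-- ===== Notes on version B (the rewrite author's own statement) =====
-- stated objective: alternative
-- what changed: B filters out negative values first, dedups, and builds the answer by repeated max-extraction (at most k rounds), instead of A's sort of all distinct values followed by a bounded scan for the first negative and a slice.
-- intended difference: For k < 0 with more than -k distinct values, A returns all but the last -k of the distinct values sorted descending (an accident of Python's negative-slice arithmetic, and the result can even contain negative values), while B returns [], the intended answer for 'at most k elements' when k <= 0. — e.g. on maxKDistinct([1, 2], -1): A returns [2], B returns []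
import Mathlib
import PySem

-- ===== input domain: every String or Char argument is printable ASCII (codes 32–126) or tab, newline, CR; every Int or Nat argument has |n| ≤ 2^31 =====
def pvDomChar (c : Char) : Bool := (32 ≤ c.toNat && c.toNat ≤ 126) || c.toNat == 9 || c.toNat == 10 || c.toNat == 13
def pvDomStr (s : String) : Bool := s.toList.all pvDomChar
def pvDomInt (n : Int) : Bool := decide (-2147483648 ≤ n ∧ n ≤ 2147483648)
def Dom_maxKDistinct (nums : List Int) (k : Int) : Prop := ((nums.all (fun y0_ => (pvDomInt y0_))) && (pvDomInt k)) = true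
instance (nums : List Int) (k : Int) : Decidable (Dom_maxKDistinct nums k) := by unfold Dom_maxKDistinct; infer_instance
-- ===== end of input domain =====

-- B filters out negatives first and extracts the maximum up to k times (alternative algorithm);
-- A sorts all distinct values, scans for the first negative among the first k+1 positions, and slices.

-- ===== PORT A =====
-- A's 'for i in range(k + 1): if i < len(nums) and nums[i] < 0: ans = i; break' loop
def pvALoop (xs : List Int) : List Int → Int → Int
  | [], ans => ans
  | i :: rest, ans =>
      if i < (xs.length : Int) ∧ PySem.List.pyGetD xs i 0 < 0 then i
      else pvALoop xs rest ans

def maxKDistinct (nums : List Int) (k : Int) : List Int :=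
  let nums1 := PySem.Set.ofList nums                          -- nums = list(set(nums))
  let nums2 := PySem.List.sorted nums1 (fun x => x) true      -- nums.sort(reverse=True)
  let ans := pvALoop nums2 (PySem.List.pyRange 0 (k + 1) 1) k
  PySem.List.slice nums2 none (some ans)                      -- return nums[:ans]

-- ===== PORT B =====
-- B's 'while len(res) < k and pool: m = max(pool); pool.remove(m); res.append(m)' loop
-- (pool.remove(m) is ported as pool.erase m: m = max(pool) ∈ pool, cf. PySem.List.remove?_eq_some_erase)
def pvBLoop (k : Int) (res pool : List Int) : List Int :=
  if (res.length : Int) < k ∧ pool ≠ [] then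
    match hm : PySem.List.max? pool (fun x => x) with
    | none => res
    | some m => pvBLoop k (res ++ [m]) (pool.erase m)
  else res
termination_by pool.length
decreasing_by
  have := List.length_erase_of_mem (PySem.List.max?_mem hm)
  have := List.length_pos_of_mem (PySem.List.max?_mem hm)
  omega

def maxKDistinct_alt (nums : List Int) (k : Int) : List Int :=
  pvBLoop k [] (PySem.Set.ofList (nums.filter (fun x => decide (0 ≤ x))))   -- pool = {x for x in nums if x >= 0}

-- ===== PRECONDITION & SPEC =====
-- For k < 0 with more than -k distinct values, A returns all but the last -k of the distinct
-- values sorted descending (an accident of Python's negative-slice arithmetic; the result can even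
-- contain negative values), while B returns [], the intended answer for 'at most k' when k ≤ 0.
def D_maxKDistinct (nums : List Int) (k : Int) : Prop :=
  k < 0 ∧ -k < ((PySem.List.dedup nums).length : Int)
instance (nums : List Int) (k : Int) : Decidable (D_maxKDistinct nums k) := by
  unfold D_maxKDistinct; infer_instance

def Spec_maxKDistinct (nums : List Int) (k : Int) (out : List Int) : Prop :=
  ¬ D_maxKDistinct nums k → out = maxKDistinct_alt nums k
instance (nums : List Int) (k : Int) (out : List Int) : Decidable (Spec_maxKDistinct nums k out) := by
  unfold Spec_maxKDistinct; infer_instance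

def pvDiffWitness_maxKDistinct : List Int × Int := ([1, 2], -1)
def pvDiffWitnessOut_maxKDistinct : (List Int) × (List Int) := ([2], [])

-- ===== CLAIM (what is proved, stated in full; the proofs are below) =====
def Claim_unchanged_maxKDistinct : Prop := ∀ (nums : List Int) (k : Int), Dom_maxKDistinct nums k → Spec_maxKDistinct nums k (maxKDistinct nums k)
def Claim_changed_maxKDistinct : Prop := Dom_maxKDistinct (pvDiffWitness_maxKDistinct.1) (pvDiffWitness_maxKDistinct.2) ∧ D_maxKDistinct (pvDiffWitness_maxKDistinct.1) (pvDiffWitness_maxKDistinct.2) ∧ maxKDistinct (pvDiffWitness_maxKDistinct.1) (pvDiffWitness_maxKDistinct.2) = pvDiffWitnessOut_maxKDistinct.1 ∧ maxKDistinct_alt (pvDiffWitness_maxKDistinct.1) (pvDiffWitness_maxKDistinct.2) = pvDiffWitnessOut_maxKDistinct.2 ∧ pvDiffWitnessOut_maxKDistinct.1 ≠ pvDiffWitnessOut_maxKDistinct.2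
def Claim_exact_maxKDistinct : Prop := ∀ (nums : List Int) (k : Int), Dom_maxKDistinct nums k → D_maxKDistinct nums k → maxKDistinct nums k ≠ maxKDistinct_alt nums k

-- ===== LEMMAS AND PROOFS =====

-- abbreviations used only by the proofs
def pvQ : Int → Bool := fun x => decide (0 ≤ x)
def pvSortD (l : List Int) : List Int := PySem.List.sorted l (fun x => x) true

-- the descending sort of a nodup list is strictly decreasing
theorem pvSortD_pairwise_gt (l : List Int) (h : l.Nodup) : (pvSortD l).Pairwise (· > ·) := by
  have h1 := PySem.List.sorted_pairwise_rev l (fun x => x)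
  have h2 : (pvSortD l).Nodup := ((PySem.List.sorted_perm l (fun x => x) true).nodup_iff).mpr h
  exact (h1.and h2).imp (fun hab => lt_of_le_of_ne hab.1 (Ne.symm hab.2))

theorem pvSortD_nodup (l : List Int) (h : l.Nodup) : (pvSortD l).Nodup :=
  ((PySem.List.sorted_perm l (fun x => x) true).nodup_iff).mpr h

-- peeling the maximum off a nodup pool peels the head of its descending sort
theorem pvSortD_cons_max (pool : List Int) (m : Int) (hnd : pool.Nodup)
    (hm : PySem.List.max? pool (fun x => x) = some m) :
    pvSortD pool = m :: pvSortD (pool.erase m) := by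
  have hmem : m ∈ pool := PySem.List.max?_mem hm
  have hperm : (m :: pvSortD (pool.erase m)).Perm pool := by
    refine List.Perm.trans ?_ (List.perm_cons_erase hmem).symm
    exact (PySem.List.sorted_perm (pool.erase m) (fun x => x) true).cons m
  refine PySem.List.sorted_rev_eq_of_perm_of_pairwise_gt _ _ _ hperm ?_
  refine List.pairwise_cons.mpr ⟨?_, pvSortD_pairwise_gt _ (hnd.erase m)⟩
  intro y hy
  have hy' : y ∈ pool.erase m := (PySem.List.sorted_perm _ _ _).mem_iff.mp hy
  have hyp : y ∈ pool := List.mem_of_mem_erase hy'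
  have hle : y ≤ m := PySem.List.max?_isMax hm y hyp
  have hne : y ≠ m := (List.Nodup.mem_erase_iff hnd).mp hy' |>.1
  exact lt_of_le_of_ne hle hne

-- B's loop extracts the first (k - len res) elements of the descending sort of the pool
theorem pvBLoop_spec (k : Int) : ∀ (n : Nat) (pool res : List Int), pool.length = n → pool.Nodup →
    pvBLoop k res pool = res ++ (pvSortD pool).take (k - res.length).toNat := by
  intro n
  induction n using Nat.strong_induction_on with
  | _ n ih =>
    intro pool res hlen hnd
    rw [pvBLoop]
    by_cases hc : (res.length : Int) < k ∧ pool ≠ []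
    · rw [if_pos hc]
      obtain ⟨hk, hne⟩ := hc
      split
      · next hmx => exact absurd ((PySem.List.max?_eq_none_iff _ _).mp hmx) hne
      · next m hm =>
        have hmem : m ∈ pool := PySem.List.max?_mem hm
        have hlt : (pool.erase m).length < n := by
          have := List.length_erase_of_mem hmem
          have := List.length_pos_of_mem hmem
          omega
        rw [ih _ hlt (pool.erase m) (res ++ [m]) rfl (hnd.erase m)]
        rw [pvSortD_cons_max pool m hnd hm]
        have h1 : (k - (res.length : Int)).toNat = (k - ((res ++ [m]).length : Int)).toNat + 1 := by
          simp only [List.length_append, List.length_cons, List.length_nil]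
          omega
        rw [h1]
        simp [List.take_succ_cons]
    · rw [if_neg hc]
      rcases not_and_or.mp hc with h | h
      · have h0 : (k - (res.length : Int)).toNat = 0 := by omega
        simp [h0]
      · have hpool : pool = [] := not_not.mp h
        subst hpool
        have : pvSortD [] = ([] : List Int) := rfl
        simp [this]

-- on a strictly decreasing list, the nonnegative prefix is the nonnegative sublist
theorem pvTakeWhile_eq_filter : ∀ (l : List Int), l.Pairwise (· > ·) →
    l.takeWhile pvQ = l.filter pvQ := by
  intro l
  induction l with
  | nil => simp
  | cons a t ih =>
    intro h
    rcases List.pairwise_cons.mp h with ⟨ha, ht⟩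
    by_cases hq : pvQ a
    · simp only [List.takeWhile_cons, List.filter_cons, hq, if_true, ih ht]
    · have hneg : a < 0 := by simpa [pvQ] using hq
      have hnil : t.filter pvQ = [] := by
        refine List.filter_eq_nil_iff.mpr (fun y hy => ?_)
        have : y < a := ha y hy
        simp [pvQ]; omega
      simp [hq, hnil]

-- A's loop when no index in the list fires the break
theorem pvALoop_all_false (xs : List Int) : ∀ (l : List Int) (k : Int),
    (∀ i ∈ l, ¬(i < (xs.length : Int) ∧ PySem.List.pyGetD xs i 0 < 0)) → pvALoop xs l k = k := by
  intro l
  induction l with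
  | nil => intro k _; rfl
  | cons i rest ih =>
    intro k h
    rw [pvALoop]
    rw [if_neg (h i (List.mem_cons_self))]
    exact ih k (fun j hj => h j (List.mem_cons_of_mem i hj))

-- A's loop stops at the first index that fires the break
theorem pvALoop_break (xs : List Int) : ∀ (l1 : List Int) (i : Int) (l2 : List Int) (k : Int),
    (∀ j ∈ l1, ¬(j < (xs.length : Int) ∧ PySem.List.pyGetD xs j 0 < 0)) →
    (i < (xs.length : Int) ∧ PySem.List.pyGetD xs i 0 < 0) →
    pvALoop xs (l1 ++ i :: l2) k = i := by
  intro l1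
  induction l1 with
  | nil => intro i l2 k _ hi; rw [List.nil_append, pvALoop, if_pos hi]
  | cons j rest ih =>
    intro i l2 k h hi
    rw [List.cons_append, pvALoop, if_neg (h j (List.mem_cons_self))]
    exact ih i l2 k (fun j' hj' => h j' (List.mem_cons_of_mem j hj')) hi

-- the next element after the nonnegative prefix fails pvQ
theorem pvNext_neg (p : Int → Bool) : ∀ (l : List Int) (h : (l.takeWhile p).length < l.length),
    p (l[(l.takeWhile p).length]'h) = false := by
  intro l
  induction l with
  | nil => simp
  | cons a t ih =>
    intro h
    by_cases hp : p a
    · simp only [List.takeWhile_cons, hp, if_true] at h ⊢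
      simpa using ih (by simpa using h)
    · simp only [List.takeWhile_cons, hp] at h ⊢
      simp [hp]

-- characterization of the break condition on a strictly decreasing xs:
-- with p := length of the nonnegative prefix, index j fires iff p ≤ j < len xs
theorem pvCond_iff (xs : List Int) (hp : xs.Pairwise (· > ·)) (j : Int) (hj : 0 ≤ j) :
    (j < (xs.length : Int) ∧ PySem.List.pyGetD xs j 0 < 0) ↔
    ((xs.takeWhile pvQ).length : Int) ≤ j ∧ j < (xs.length : Int) := by
  set pl := (xs.takeWhile pvQ).length with hpl
  have hple : pl ≤ xs.length := (List.takeWhile_prefix pvQ).length_le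
  constructor
  · rintro ⟨h1, h2⟩
    refine ⟨?_, h1⟩
    by_contra hlt
    rw [not_le] at hlt
    have hjn : j.toNat < pl := by omega
    rw [PySem.List.pyGetD_eq_getElem xs 0 hj h1] at h2
    have : xs[j.toNat] = (xs.takeWhile pvQ)[j.toNat]'hjn :=
      ((List.takeWhile_prefix pvQ).getElem hjn).symm
    have hq : pvQ xs[j.toNat] := by
      rw [this]; exact List.mem_takeWhile_imp (List.getElem_mem _)
    simp [pvQ] at hq
    omega
  · rintro ⟨h1, h2⟩
    refine ⟨h2, ?_⟩
    rw [PySem.List.pyGetD_eq_getElem xs 0 hj h2]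
    have hplt : pl < xs.length := by omega
    have hxp : xs[pl] < 0 := by
      have := pvNext_neg pvQ xs hplt
      simp [pvQ] at this
      omega
    by_cases hjp : j.toNat = pl
    · simpa [hjp] using hxp
    · have hlt : pl < j.toNat := by omega
      have := List.pairwise_iff_getElem.mp hp pl j.toNat hplt (by omega) hlt
      omega

-- A's result for 0 ≤ k, on a strictly decreasing xs
theorem pvA_result (xs : List Int) (k : Int) (hk : 0 ≤ k) (hp : xs.Pairwise (· > ·)) :
    PySem.List.slice xs none (some (pvALoop xs (PySem.List.pyRange 0 (k + 1) 1) k)) =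
    (xs.takeWhile pvQ).take k.toNat := by
  set pl := (xs.takeWhile pvQ).length with hpl
  have hple : pl ≤ xs.length := (List.takeWhile_prefix pvQ).length_le
  have htw : xs.takeWhile pvQ = xs.take pl := by
    rw [hpl]
    exact List.prefix_iff_eq_take.mp (List.takeWhile_prefix (l := xs) pvQ)
  clear_value pl
  by_cases hcase : (pl : Int) ≤ k ∧ pl < xs.length
  · -- the loop breaks at index pl
    obtain ⟨hc1, hc2⟩ := hcase
    have h2 : PySem.List.pyRange (pl : Int) (k + 1) 1 =
        (pl : Int) :: PySem.List.pyRange ((pl : Int) + 1) (k + 1) 1 :=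
      PySem.List.pyRange_one_cons (by omega)
    have hsplit : PySem.List.pyRange 0 (k + 1) 1 =
        PySem.List.pyRange 0 pl 1 ++ (pl : Int) :: PySem.List.pyRange ((pl : Int) + 1) (k + 1) 1 := by
      rw [PySem.List.pyRange_one_append 0 (pl : Int) (k + 1) (by omega) (by omega), h2]
    rw [hsplit, pvALoop_break]
    · rw [PySem.List.slice_to _ (by omega), Int.toNat_natCast, htw, List.take_take]
      congr 1
      omega
    · intro j hj
      rw [PySem.List.mem_pyRange_one] at hj
      rw [pvCond_iff xs hp j hj.1]
      omega
    · rw [pvCond_iff xs hp (pl : Int) (by omega)]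
      omega
  · -- the loop never breaks: ans = k: every index in [0, k] is either < pl (nonnegative) or ≥ len
    have hans : pvALoop xs (PySem.List.pyRange 0 (k + 1) 1) k = k := by
      refine pvALoop_all_false xs _ k (fun j hj => ?_)
      rw [PySem.List.mem_pyRange_one] at hj
      rw [pvCond_iff xs hp j hj.1]
      omega
    rw [hans, PySem.List.slice_to _ hk, htw, List.take_take, List.take_eq_take_iff]
    rcases not_and_or.mp hcase with h | h <;> omega

-- xs[:b] = [] for b ≤ -len xs
theorem pvSlice_neg_nil (xs : List Int) (b : Int) (h : (xs.length : Int) + b ≤ 0) :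
    PySem.List.slice xs none (some b) = [] := by
  by_cases hb : 0 ≤ b
  · rw [PySem.List.slice_to _ hb]
    have h0 : xs = [] := List.length_eq_zero_iff.mp (by omega)
    simp [h0]
  · apply List.eq_nil_of_length_eq_zero
    rw [← PySem.List.slice_zero_start (b? := some b), PySem.List.length_slice]
    simp only [PySem.List.clampIdx]
    split_ifs <;> omega

-- the two filtered-dedup pools agree up to permutation
theorem pvPool_perm (nums : List Int) :
    ((PySem.List.sorted (PySem.Set.ofList nums) (fun x => x) true).filter pvQ).Perm
      (PySem.Set.ofList (nums.filter (fun x => decide (0 ≤ x)))) := by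
  have hnd1 : ((PySem.List.sorted (PySem.Set.ofList nums) (fun x => x) true).filter pvQ).Nodup :=
    (pvSortD_nodup _ (PySem.Set.nodup_ofList nums)).filter pvQ
  have hnd2 := PySem.Set.nodup_ofList (nums.filter (fun x => decide (0 ≤ x)))
  refine (List.perm_ext_iff_of_nodup hnd1 hnd2).mpr (fun a => ?_)
  simp [List.mem_filter, PySem.List.mem_sorted, PySem.Set.mem_ofList, pvQ]

-- main equivalence for 0 ≤ k
theorem pvMain (nums : List Int) (k : Int) (hk : 0 ≤ k) :
    maxKDistinct nums k = maxKDistinct_alt nums k := by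
  unfold maxKDistinct maxKDistinct_alt
  set xs := PySem.List.sorted (PySem.Set.ofList nums) (fun x => x) true with hxs
  have hndS := PySem.Set.nodup_ofList nums
  have hpair : xs.Pairwise (· > ·) := pvSortD_pairwise_gt _ hndS
  set P := PySem.Set.ofList (nums.filter (fun x => decide (0 ≤ x))) with hP
  have hndP := PySem.Set.nodup_ofList (nums.filter (fun x => decide (0 ≤ x)))
  rw [pvBLoop_spec k P.length P [] rfl hndP]
  have hsort : pvSortD P = xs.filter pvQ := by
    exact PySem.List.sorted_rev_eq_of_perm_of_pairwise_gt _ _ _ (pvPool_perm nums)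
      (hpair.filter pvQ)
  simp only [List.nil_append, List.length_nil, Int.natCast_zero, Int.sub_zero]
  rw [hsort, pvA_result xs k hk hpair, pvTakeWhile_eq_filter xs hpair]

-- ===== VERDICT (by name: the statement is the Claim_ definition above) =====
theorem maxKDistinct_spec : Claim_unchanged_maxKDistinct := by
  intro nums k _
  unfold Spec_maxKDistinct
  intro hD
  by_cases hk : 0 ≤ k
  · exact pvMain nums k hk
  · -- k < 0 and, by ¬D_, at most -k distinct values: both sides are []
    unfold D_maxKDistinct at hD
    have hlen : ((PySem.List.dedup nums).length : Int) ≤ -k := by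
      by_contra hc
      exact hD ⟨by omega, by omega⟩
    rw [PySem.List.dedup_eq_ofList] at hlen
    unfold maxKDistinct maxKDistinct_alt
    rw [pvBLoop, if_neg (by simp; omega)]
    rw [PySem.List.pyRange_one_eq_nil (by omega : k + 1 ≤ 0)]
    show PySem.List.slice _ none (some k) = []
    refine pvSlice_neg_nil _ k ?_
    rw [PySem.List.length_sorted]
    omega

theorem maxKDistinct_changed : Claim_changed_maxKDistinct := by
  unfold Claim_changed_maxKDistinct
  refine ⟨by decide, by decide, by decide, ?_, by decide⟩
  show maxKDistinct_alt [1, 2] (-1) = []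
  unfold maxKDistinct_alt
  rw [pvBLoop, if_neg (by decide)]

theorem maxKDistinct_tight : Claim_exact_maxKDistinct := by
  intro nums k _ hD
  obtain ⟨hk, hlen⟩ := hD
  rw [PySem.List.dedup_eq_ofList] at hlen
  -- B returns [] (the while guard 0 < k fails at once), A returns a nonempty slice
  have hB : maxKDistinct_alt nums k = [] := by
    unfold maxKDistinct_alt
    rw [pvBLoop, if_neg (by simp; omega)]
  rw [hB]
  unfold maxKDistinct
  rw [PySem.List.pyRange_one_eq_nil (by omega : k + 1 ≤ 0)]
  show PySem.List.slice _ none (some k) ≠ []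
  intro hA
  have hlen2 : (PySem.List.sorted (PySem.Set.ofList nums) (fun x => x) true).length =
      (PySem.Set.ofList nums).length := PySem.List.length_sorted _ _ _
  have hcon := congrArg List.length hA
  rw [← PySem.List.slice_zero_start (b? := some _), PySem.List.length_slice] at hcon
  simp only [PySem.List.clampIdx, List.length_nil] at hcon
  rw [hlen2] at hcon
  split_ifs at hcon <;> omega
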